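-- pv_equiv track=rewrite | github.com/giodegeronimo/ACMEModels | scripts/enrich_handler_docstrings.py | _build_docstring
-- ===== SOURCE A (Python) =====
-- def _summarize(name: str) -> str:
--     if name == "lambda_handler":
--         return "AWS Lambda handler entry point."
--     if name.startswith("_parse_"):
--         return f"Parse and validate `{name.removeprefix('_parse_')}` from the request."
--     if name == "_require_auth":
--         return "Enforce request authentication for this handler."
--     if name == "_extract_auth_token":
--         return "Extract an authentication token from the request."
--     if name == "_json_response":
--         return "Create a JSON API Gateway proxy response."
--     if name == "_error_response":
--         return "Create a JSON error response payload."
--     if name.endswith("_response"):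
--         return "Create an API Gateway proxy response payload."
--     if name.startswith("_decode_"):
--         return "Decode and validate request payload data."
--     if name.startswith("_encode_"):
--         return "Encode a continuation token for pagination."
--     if name.startswith("_build_"):
--         return "Build a derived URL or response value."
--     if name.startswith("_resolve_"):
--         return "Resolve configuration from environment/request context."
--     if name.startswith("_store_"):
--         return "Persist data to a backing store."
--     if name.startswith("_load_"):
--         return "Load data from a backing store."
--     if name.startswith("_validate_"):
--         return "Validate request inputs against stored state."
--     if name.startswith("_serialize_"):
--         return "Serialize a domain object into a JSON payload."
--     if name.startswith("_collect_"):
--         return "Collect and paginate results from a backing index."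
--     if name.startswith("_entry_"):
--         return "Apply matching logic to a single index entry."
--     if name.startswith("_run_with_timeout"):
--         return "Execute a callable with a wall-clock timeout."
--     return "Helper function."
--
-- def _build_docstring(indent: str, name: str, params: list[str]) -> str:
--     summary = _summarize(name)
--     lines = ['"""' + summary]
--     if params:
--         lines.append("")
--         for param in params:
--             lines.append(f":param {param}:")
--     lines.append(":returns:")
--     lines.append('"""')
--     return "\n".join(indent + line if line else "" for line in lines)
-- ===== SOURCE B (Python) =====
-- # Dict-lookup re-implementation: instead of scanning rules one by one, B derives
-- # the candidate "_word_" prefix from the name itself (text up to the second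
-- # underscore) and resolves exact names and derived prefixes by O(1) dictionary
-- # lookups; docstring text is assembled by direct concatenation.
--
-- _EXACT_SUMMARIES = {
--     "lambda_handler": "AWS Lambda handler entry point.",
--     "_require_auth": "Enforce request authentication for this handler.",
--     "_extract_auth_token": "Extract an authentication token from the request.",
--     "_json_response": "Create a JSON API Gateway proxy response.",
--     "_error_response": "Create a JSON error response payload.",
-- }
--
-- _PREFIX_SUMMARIES = {
--     "_decode_": "Decode and validate request payload data.",
--     "_encode_": "Encode a continuation token for pagination.",
--     "_build_": "Build a derived URL or response value.",
--     "_resolve_": "Resolve configuration from environment/request context.",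
--     "_store_": "Persist data to a backing store.",
--     "_load_": "Load data from a backing store.",
--     "_validate_": "Validate request inputs against stored state.",
--     "_serialize_": "Serialize a domain object into a JSON payload.",
--     "_collect_": "Collect and paginate results from a backing index.",
--     "_entry_": "Apply matching logic to a single index entry.",
-- }
--
--
-- def _summary_of(name: str) -> str:
--     hit = _EXACT_SUMMARIES.get(name)
--     if hit is not None:
--         return hit
--     if name.startswith("_parse_"):
--         return f"Parse and validate `{name[7:]}` from the request."
--     if name.endswith("_response"):
--         return "Create an API Gateway proxy response payload."
--     sep = name.find("_", 1)
--     if name.startswith("_") and sep != -1: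
--         hit = _PREFIX_SUMMARIES.get(name[: sep + 1])
--         if hit is not None:
--             return hit
--     if name.startswith("_run_with_timeout"):
--         return "Execute a callable with a wall-clock timeout."
--     return "Helper function."
--
--
-- def _build_docstring(indent: str, name: str, params: list[str]) -> str:
--     head = indent + '"""' + _summary_of(name)
--     if params:
--         body = "\n\n" + "\n".join(indent + ":param " + p + ":" for p in params) + "\n"
--     else:
--         body = "\n"
--     return head + body + indent + ":returns:\n" + indent + '"""'
-- ===== Notes on version B (the rewrite author's own statement) =====
-- stated objective: alternative
-- what changed: B resolves the summary by hashing instead of scanning: exact names go through one dict lookup, and the ten '_word_' prefix rules are replaced by deriving the candidate prefix from the name itself (text up to the second underscore) and looking it up in a prefix dict, leaving only the three irregular checks (_parse_ template, _response suffix, _run_with_timeout) as direct tests; the docstring is assembled by direct concatenation instead of a lines list joined through a conditional map.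
import Mathlib
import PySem

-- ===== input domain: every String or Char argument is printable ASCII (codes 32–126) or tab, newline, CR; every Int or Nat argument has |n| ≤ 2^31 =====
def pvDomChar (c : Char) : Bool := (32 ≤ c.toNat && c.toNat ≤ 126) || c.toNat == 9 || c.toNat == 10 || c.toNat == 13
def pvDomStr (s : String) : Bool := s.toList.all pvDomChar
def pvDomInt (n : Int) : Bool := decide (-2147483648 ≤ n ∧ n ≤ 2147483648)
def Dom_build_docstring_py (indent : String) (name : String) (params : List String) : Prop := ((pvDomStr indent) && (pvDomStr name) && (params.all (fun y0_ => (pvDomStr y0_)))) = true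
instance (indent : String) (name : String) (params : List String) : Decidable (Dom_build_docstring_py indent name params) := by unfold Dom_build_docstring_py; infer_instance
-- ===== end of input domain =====

-- B replaces A's sequential 19-rule chain by dictionary lookups (exact names, and a
-- candidate "_word_" prefix derived from the name itself) and assembles the docstring
-- by direct concatenation (objective: alternative).

-- ===== PORT A =====
-- Python str.removeprefix, ported by hand (exact).
def pyRemoveprefix (s p : String) : String :=
  if PySem.Str.startswith s p then PySem.Str.slice s (some (PySem.Str.len p)) none else s

def summarizeA (name : String) : String :=
  if name == "lambda_handler" then "AWS Lambda handler entry point."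
  else if PySem.Str.startswith name "_parse_" then
    "Parse and validate `" ++ pyRemoveprefix name "_parse_" ++ "` from the request."
  else if name == "_require_auth" then "Enforce request authentication for this handler."
  else if name == "_extract_auth_token" then "Extract an authentication token from the request."
  else if name == "_json_response" then "Create a JSON API Gateway proxy response."
  else if name == "_error_response" then "Create a JSON error response payload."
  else if PySem.Str.endswith name "_response" then "Create an API Gateway proxy response payload."
  else if PySem.Str.startswith name "_decode_" then "Decode and validate request payload data."
  else if PySem.Str.startswith name "_encode_" then "Encode a continuation token for pagination."
  else if PySem.Str.startswith name "_build_" then "Build a derived URL or response value."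
  else if PySem.Str.startswith name "_resolve_" then "Resolve configuration from environment/request context."
  else if PySem.Str.startswith name "_store_" then "Persist data to a backing store."
  else if PySem.Str.startswith name "_load_" then "Load data from a backing store."
  else if PySem.Str.startswith name "_validate_" then "Validate request inputs against stored state."
  else if PySem.Str.startswith name "_serialize_" then "Serialize a domain object into a JSON payload."
  else if PySem.Str.startswith name "_collect_" then "Collect and paginate results from a backing index."
  else if PySem.Str.startswith name "_entry_" then "Apply matching logic to a single index entry."
  else if PySem.Str.startswith name "_run_with_timeout" then "Execute a callable with a wall-clock timeout."
  else "Helper function."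

def build_docstring_py (indent : String) (name : String) (params : List String) : String :=
  let summary := summarizeA name
  let lines : List String := ["\"\"\"" ++ summary]
  let lines := if params.isEmpty then lines
    else lines ++ [""] ++ params.map (fun param => ":param " ++ param ++ ":")
  let lines := lines ++ [":returns:", "\"\"\""]
  PySem.Str.join "\n" (lines.map (fun line => if line == "" then "" else indent ++ line))

-- ===== PORT B =====
def exactSummaries : PySem.Dict String String := PySem.Dict.ofList
  [("lambda_handler", "AWS Lambda handler entry point."),
   ("_require_auth", "Enforce request authentication for this handler."),
   ("_extract_auth_token", "Extract an authentication token from the request."),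
   ("_json_response", "Create a JSON API Gateway proxy response."),
   ("_error_response", "Create a JSON error response payload.")]

def prefixSummaries : PySem.Dict String String := PySem.Dict.ofList
  [("_decode_", "Decode and validate request payload data."),
   ("_encode_", "Encode a continuation token for pagination."),
   ("_build_", "Build a derived URL or response value."),
   ("_resolve_", "Resolve configuration from environment/request context."),
   ("_store_", "Persist data to a backing store."),
   ("_load_", "Load data from a backing store."),
   ("_validate_", "Validate request inputs against stored state."),
   ("_serialize_", "Serialize a domain object into a JSON payload."),
   ("_collect_", "Collect and paginate results from a backing index."),
   ("_entry_", "Apply matching logic to a single index entry.")]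

def summaryOf (name : String) : String :=
  match exactSummaries.get? name with
  | some s => s
  | none =>
    if PySem.Str.startswith name "_parse_" then
      "Parse and validate `" ++ PySem.Str.slice name (some 7) none ++ "` from the request."
    else if PySem.Str.endswith name "_response" then
      "Create an API Gateway proxy response payload."
    else
      let sep := PySem.Str.findFrom name "_" 1 none
      let hit : Option String :=
        if PySem.Str.startswith name "_" = true ∧ sep ≠ -1 then
          prefixSummaries.get? (PySem.Str.slice name none (some (sep + 1)))
        else none
      match hit with
      | some s => s
      | none =>
        if PySem.Str.startswith name "_run_with_timeout" then
          "Execute a callable with a wall-clock timeout."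
        else "Helper function."

def build_docstring_py_alt (indent : String) (name : String) (params : List String) : String :=
  let head := indent ++ "\"\"\"" ++ summaryOf name
  let body := if params.isEmpty then "\n"
    else "\n\n" ++ PySem.Str.join "\n" (params.map (fun p => indent ++ ":param " ++ p ++ ":")) ++ "\n"
  head ++ body ++ indent ++ ":returns:\n" ++ indent ++ "\"\"\""

-- ===== PRECONDITION & SPEC =====
def Spec_build_docstring_py (indent : String) (name : String) (params : List String) (out : String) : Prop := out = build_docstring_py_alt indent name params
instance (indent : String) (name : String) (params : List String) (out : String) : Decidable (Spec_build_docstring_py indent name params out) := by unfold Spec_build_docstring_py; infer_instance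

-- ===== CLAIM (what is proved, stated in full; the proofs are below) =====
def Claim_equal_build_docstring_py : Prop := ∀ (indent : String) (name : String) (params : List String), Dom_build_docstring_py indent name params → Spec_build_docstring_py indent name params (build_docstring_py indent name params)

-- ===== LEMMAS AND PROOFS =====
theorem find_key (w t : List Char) (hw : '_' ∉ w) :
    PySem.Chars.find (w ++ '_' :: t) ['_'] = (w.length : Int) := by
  set l := w ++ '_' :: t with hl
  have hinf : ['_'] <:+: l := ⟨w, t, by simp [hl]⟩
  have h0 : 0 ≤ PySem.Chars.find l ['_'] := (PySem.Chars.find_nonneg_iff l ['_']).mpr hinf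
  obtain ⟨hpre, hmin⟩ := PySem.Chars.find_spec h0
  have hle : (PySem.Chars.find l ['_']).toNat ≤ w.length := by
    by_contra hc
    push Not at hc
    exact hmin w.length hc ⟨t, by simp [hl]⟩
  have hge : ¬ (PySem.Chars.find l ['_']).toNat < w.length := by
    intro hlt
    have hg : l[(PySem.Chars.find l ['_']).toNat]? = some '_' := by
      rcases hpre with ⟨t', ht'⟩
      have h2 := (List.head?_drop (l := l) (i := (PySem.Chars.find l ['_']).toNat)).symm
      rw [← ht'] at h2
      simpa using h2
    rw [hl, List.getElem?_append_left hlt] at hg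
    exact hw (List.mem_of_getElem? hg)
  omega

theorem key_of_prefix (name p : String) (w : List Char)
    (hp : p.toList = '_' :: w ++ ['_']) (hw : '_' ∉ w)
    (h : PySem.Str.startswith name p = true) :
    PySem.Str.findFrom name "_" 1 none = (w.length : Int) + 1 ∧
    PySem.Str.slice name none (some ((w.length : Int) + 1 + 1)) = p := by
  have hpre : p.toList <+: name.toList := by
    have := PySem.Chars.startswith_iff name.toList p.toList
    simp at h
    exact this.mp h
  obtain ⟨t, ht⟩ := hpre
  rw [hp] at ht
  have hlen1 : 1 ≤ name.toList.length := by
    rw [← ht]; simp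
  have hdrop : name.toList.drop 1 = w ++ '_' :: t := by
    rw [← ht]; simp
  have hfind : PySem.Chars.find (name.toList.drop 1) ['_'] = (w.length : Int) := by
    rw [hdrop]; exact find_key w t hw
  have hff := PySem.Chars.findFrom_natCast name.toList ['_'] 1 hlen1
  have hne : (w.length : Int) ≠ -1 := by omega
  constructor
  · norm_num at hff
    rw [show PySem.Str.findFrom name "_" 1 none = PySem.Chars.findFrom name.toList ['_'] 1 none by simp]
    rw [hff]
    rw [show name.toList.tail = List.drop 1 name.toList by simp, hfind, if_neg hne]
    ring
  · apply String.toList_inj.mp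
    have hb : (0 : Int) ≤ ↑w.length + 1 + 1 := by positivity
    rw [hp]
    simp only [PySem.Str.toList_slice, PySem.Chars.slice_eq_listSlice]
    rw [PySem.List.slice_to _ hb]
    rw [show (↑w.length + 1 + 1 : Int).toNat = ('_' :: w ++ ['_']).length by simp; omega]
    rw [← ht, List.take_left]

theorem exact_eq_mk : exactSummaries = PySem.Dict.mk
  [("lambda_handler", "AWS Lambda handler entry point."),
   ("_require_auth", "Enforce request authentication for this handler."),
   ("_extract_auth_token", "Extract an authentication token from the request."),
   ("_json_response", "Create a JSON API Gateway proxy response."),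
   ("_error_response", "Create a JSON error response payload.")] := by decide

theorem exact_none (name : String)
    (h1 : name ≠ "lambda_handler") (h2 : name ≠ "_require_auth")
    (h3 : name ≠ "_extract_auth_token") (h4 : name ≠ "_json_response")
    (h5 : name ≠ "_error_response") :
    exactSummaries.get? name = none := by
  rw [exact_eq_mk]
  simp [Ne.symm h1, Ne.symm h2, Ne.symm h3, Ne.symm h4, Ne.symm h5, PySem.Dict.get?]

theorem prefix_eq_mk : prefixSummaries = PySem.Dict.mk
  [("_decode_", "Decode and validate request payload data."),
   ("_encode_", "Encode a continuation token for pagination."),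
   ("_build_", "Build a derived URL or response value."),
   ("_resolve_", "Resolve configuration from environment/request context."),
   ("_store_", "Persist data to a backing store."),
   ("_load_", "Load data from a backing store."),
   ("_validate_", "Validate request inputs against stored state."),
   ("_serialize_", "Serialize a domain object into a JSON payload."),
   ("_collect_", "Collect and paginate results from a backing index."),
   ("_entry_", "Apply matching logic to a single index entry.")] := by decide

theorem summaryOf_prefix (name p s : String) (w : List Char)
    (hp : p.toList = '_' :: w ++ ['_']) (hw : '_' ∉ w)
    (hget : prefixSummaries.get? p = some s)
    (hstart : PySem.Str.startswith name p = true)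
    (hex : exactSummaries.get? name = none)
    (hparse : PySem.Str.startswith name "_parse_" = false)
    (hresp : PySem.Str.endswith name "_response" = false) :
    summaryOf name = s := by
  obtain ⟨hsep, hslice⟩ := key_of_prefix name p w hp hw hstart
  have hus : PySem.Str.startswith name "_" = true := by
    simp only [PySem.Str.startswith_eq] at hstart ⊢
    rw [PySem.Chars.startswith_iff] at hstart ⊢
    rw [hp] at hstart
    obtain ⟨t, ht⟩ := hstart
    rw [← ht]
    simp
  have hne : ((w.length : Int) + 1) ≠ -1 := by omega
  simp only [summaryOf, hex, hparse, hresp, hsep, hus, Bool.false_eq_true, if_false, ne_eq, hne,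
    not_false_iff, and_self, if_true, hslice, hget]

theorem startswith_slice (name : String) (b : Int) (hb : 0 ≤ b) :
    PySem.Str.startswith name (PySem.Str.slice name none (some b)) = true := by
  simp only [PySem.Str.startswith_eq, PySem.Str.toList_slice, PySem.Chars.slice_eq_listSlice]
  rw [PySem.List.slice_to _ hb, PySem.Chars.startswith_iff]
  exact List.take_prefix _ _

set_option maxHeartbeats 1000000 in
theorem summaryOf_nohit (name : String)
    (hex : exactSummaries.get? name = none)
    (hparse : PySem.Str.startswith name "_parse_" = false)
    (hresp : PySem.Str.endswith name "_response" = false)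
    (g1 : PySem.Str.startswith name "_decode_" = false)
    (g2 : PySem.Str.startswith name "_encode_" = false)
    (g3 : PySem.Str.startswith name "_build_" = false)
    (g4 : PySem.Str.startswith name "_resolve_" = false)
    (g5 : PySem.Str.startswith name "_store_" = false)
    (g6 : PySem.Str.startswith name "_load_" = false)
    (g7 : PySem.Str.startswith name "_validate_" = false)
    (g8 : PySem.Str.startswith name "_serialize_" = false)
    (g9 : PySem.Str.startswith name "_collect_" = false)
    (g10 : PySem.Str.startswith name "_entry_" = false) :
    summaryOf name = (if PySem.Str.startswith name "_run_with_timeout" then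
          "Execute a callable with a wall-clock timeout."
        else "Helper function.") := by
  have hhit : (if PySem.Str.startswith name "_" = true ∧ PySem.Str.findFrom name "_" 1 none ≠ -1 then
      prefixSummaries.get? (PySem.Str.slice name none (some (PySem.Str.findFrom name "_" 1 none + 1)))
    else none) = none := by
    by_cases hc : PySem.Str.startswith name "_" = true ∧ PySem.Str.findFrom name "_" 1 none ≠ -1
    · rw [if_pos hc]
      obtain ⟨hus, hsep⟩ := hc
      have hb : 0 ≤ PySem.Str.findFrom name "_" 1 none + 1 := by
        have hlen1 : 1 ≤ name.toList.length := by
          simp only [PySem.Str.startswith_eq] at hus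
          rw [PySem.Chars.startswith_iff] at hus
          obtain ⟨t, ht⟩ := hus
          rw [← ht]; simp
        have hsep' : PySem.Chars.findFrom name.toList ['_'] 1 none ≠ -1 := by
          simpa using hsep
        have hspec := (PySem.Chars.findFrom_natCast_spec name.toList ['_'] 1 hlen1 (by simpa using hsep')).1
        norm_num at hspec
        have he : PySem.Str.findFrom name "_" 1 none = PySem.Chars.findFrom name.toList ['_'] 1 none := by simp
        rw [he]
        omega
      have hsw := startswith_slice name _ hb
      cases hk : prefixSummaries.get? (PySem.Str.slice name none (some (PySem.Str.findFrom name "_" 1 none + 1))) with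
      | none => rfl
      | some s =>
        rw [prefix_eq_mk] at hk
        simp only [PySem.Dict.get?_mk_cons] at hk
        split_ifs at hk with k1 k2 k3 k4 k5 k6 k7 k8 k9 k10
        · rw [← eq_of_beq k1] at hsw; rw [hsw] at g1; cases g1
        · rw [← eq_of_beq k2] at hsw; rw [hsw] at g2; cases g2
        · rw [← eq_of_beq k3] at hsw; rw [hsw] at g3; cases g3
        · rw [← eq_of_beq k4] at hsw; rw [hsw] at g4; cases g4
        · rw [← eq_of_beq k5] at hsw; rw [hsw] at g5; cases g5
        · rw [← eq_of_beq k6] at hsw; rw [hsw] at g6; cases g6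
        · rw [← eq_of_beq k7] at hsw; rw [hsw] at g7; cases g7
        · rw [← eq_of_beq k8] at hsw; rw [hsw] at g8; cases g8
        · rw [← eq_of_beq k9] at hsw; rw [hsw] at g9; cases g9
        · rw [← eq_of_beq k10] at hsw; rw [hsw] at g10; cases g10
        · simp [PySem.Dict.get?] at hk
    · rw [if_neg hc]
  simp only [summaryOf, hex, hparse, hresp, Bool.false_eq_true, if_false]
  rw [hhit]

theorem ne_of_sw {name p lit : String} (h : PySem.Str.startswith name p = true)
    (hlit : PySem.Str.startswith lit p = false) : name ≠ lit := by
  intro e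
  rw [e] at h
  rw [h] at hlit
  cases hlit

theorem ne_of_beqf {name lit : String} (h : ¬ ((name == lit) = true)) : name ≠ lit :=
  fun e => h (by simp [e])

set_option maxHeartbeats 1000000 in
theorem summarize_eq (name : String) : summarizeA name = summaryOf name := by
  unfold summarizeA
  by_cases h1 : (name == "lambda_handler") = true
  · rw [if_pos h1, eq_of_beq h1]; decide
  rw [if_neg h1]
  by_cases h2 : PySem.Str.startswith name "_parse_" = true
  · rw [if_pos h2]
    have hex := exact_none name (ne_of_beqf h1) (ne_of_sw h2 (by decide))
      (ne_of_sw h2 (by decide)) (ne_of_sw h2 (by decide)) (ne_of_sw h2 (by decide))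
    simp only [summaryOf, hex, h2, if_true, pyRemoveprefix]
    norm_num [show "_parse_".length = 7 from by decide]
  rw [if_neg h2]
  by_cases h3 : (name == "_require_auth") = true
  · rw [if_pos h3, eq_of_beq h3]; decide
  rw [if_neg h3]
  by_cases h4 : (name == "_extract_auth_token") = true
  · rw [if_pos h4, eq_of_beq h4]; decide
  rw [if_neg h4]
  by_cases h5 : (name == "_json_response") = true
  · rw [if_pos h5, eq_of_beq h5]; decide
  rw [if_neg h5]
  by_cases h6 : (name == "_error_response") = true
  · rw [if_pos h6, eq_of_beq h6]; decide
  rw [if_neg h6]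
  have hex := exact_none name (ne_of_beqf h1) (ne_of_beqf h3) (ne_of_beqf h4)
      (ne_of_beqf h5) (ne_of_beqf h6)
  have hp2 := Bool.eq_false_iff.mpr h2
  by_cases h7 : PySem.Str.endswith name "_response" = true
  · rw [if_pos h7]
    simp only [summaryOf, hex, hp2, h7, Bool.false_eq_true, if_false, if_true]
  rw [if_neg h7]
  have hp7 := Bool.eq_false_iff.mpr h7
  by_cases h8 : PySem.Str.startswith name "_decode_" = true
  · rw [if_pos h8]
    exact (summaryOf_prefix name "_decode_" _ "decode".toList (by decide) (by decide) (by decide) h8 hex hp2 hp7).symm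
  rw [if_neg h8]
  by_cases h9 : PySem.Str.startswith name "_encode_" = true
  · rw [if_pos h9]
    exact (summaryOf_prefix name "_encode_" _ "encode".toList (by decide) (by decide) (by decide) h9 hex hp2 hp7).symm
  rw [if_neg h9]
  by_cases h10 : PySem.Str.startswith name "_build_" = true
  · rw [if_pos h10]
    exact (summaryOf_prefix name "_build_" _ "build".toList (by decide) (by decide) (by decide) h10 hex hp2 hp7).symm
  rw [if_neg h10]
  by_cases h11 : PySem.Str.startswith name "_resolve_" = true
  · rw [if_pos h11]
    exact (summaryOf_prefix name "_resolve_" _ "resolve".toList (by decide) (by decide) (by decide) h11 hex hp2 hp7).symm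
  rw [if_neg h11]
  by_cases h12 : PySem.Str.startswith name "_store_" = true
  · rw [if_pos h12]
    exact (summaryOf_prefix name "_store_" _ "store".toList (by decide) (by decide) (by decide) h12 hex hp2 hp7).symm
  rw [if_neg h12]
  by_cases h13 : PySem.Str.startswith name "_load_" = true
  · rw [if_pos h13]
    exact (summaryOf_prefix name "_load_" _ "load".toList (by decide) (by decide) (by decide) h13 hex hp2 hp7).symm
  rw [if_neg h13]
  by_cases h14 : PySem.Str.startswith name "_validate_" = true
  · rw [if_pos h14]
    exact (summaryOf_prefix name "_validate_" _ "validate".toList (by decide) (by decide) (by decide) h14 hex hp2 hp7).symm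
  rw [if_neg h14]
  by_cases h15 : PySem.Str.startswith name "_serialize_" = true
  · rw [if_pos h15]
    exact (summaryOf_prefix name "_serialize_" _ "serialize".toList (by decide) (by decide) (by decide) h15 hex hp2 hp7).symm
  rw [if_neg h15]
  by_cases h16 : PySem.Str.startswith name "_collect_" = true
  · rw [if_pos h16]
    exact (summaryOf_prefix name "_collect_" _ "collect".toList (by decide) (by decide) (by decide) h16 hex hp2 hp7).symm
  rw [if_neg h16]
  by_cases h17 : PySem.Str.startswith name "_entry_" = true
  · rw [if_pos h17]
    exact (summaryOf_prefix name "_entry_" _ "entry".toList (by decide) (by decide) (by decide) h17 hex hp2 hp7).symm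
  rw [if_neg h17]
  rw [summaryOf_nohit name hex hp2 hp7 (Bool.eq_false_iff.mpr h8) (Bool.eq_false_iff.mpr h9)
      (Bool.eq_false_iff.mpr h10) (Bool.eq_false_iff.mpr h11) (Bool.eq_false_iff.mpr h12)
      (Bool.eq_false_iff.mpr h13) (Bool.eq_false_iff.mpr h14) (Bool.eq_false_iff.mpr h15)
      (Bool.eq_false_iff.mpr h16) (Bool.eq_false_iff.mpr h17)]

theorem join_snoc (sep t x : List Char) (xs : List (List Char)) :
    PySem.Chars.join sep (x :: (xs ++ [t])) = PySem.Chars.join sep (x :: xs) ++ sep ++ t := by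
  induction xs generalizing x with
  | nil => simp [PySem.Chars.join_cons_cons, PySem.Chars.join_singleton]
  | cons y ys ih =>
    rw [show x :: (y :: ys ++ [t]) = x :: y :: (ys ++ [t]) from rfl,
        PySem.Chars.join_cons_cons, ih, PySem.Chars.join_cons_cons]
    simp

theorem join_snoc2 (sep t1 t2 x : List Char) (xs : List (List Char)) :
    PySem.Chars.join sep (x :: (xs ++ [t1, t2])) =
      PySem.Chars.join sep (x :: xs) ++ sep ++ t1 ++ sep ++ t2 := by
  rw [show xs ++ [t1, t2] = (xs ++ [t1]) ++ [t2] by simp, join_snoc, join_snoc]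

theorem map_param (ind : String) (ps : List String) :
    List.map (String.toList ∘ (fun line => if line = "" then "" else ind ++ line) ∘
        fun param => ":param " ++ param ++ ":") ps =
      List.map (String.toList ∘ fun p => ind ++ ":param " ++ p ++ ":") ps := by
  refine List.map_congr_left fun x _ => ?_
  have hne : ":param " ++ x ++ ":" ≠ "" := by
    intro e
    have := congrArg (fun s => s.toList.length) e
    simp at this
  simp [hne]

theorem build_eq (indent name : String) (params : List String) :
    build_docstring_py indent name params = build_docstring_py_alt indent name params := by
  apply String.toList_inj.mp
  cases params with
  | nil =>
    simp [build_docstring_py, build_docstring_py_alt, summarize_eq,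
      PySem.Str.toList_join, PySem.Chars.join_cons_cons, PySem.Chars.join_singleton]
  | cons p ps =>
    simp [build_docstring_py, build_docstring_py_alt, summarize_eq,
      PySem.Str.toList_join, PySem.Chars.join_cons_cons, List.map_map]
    rw [map_param, join_snoc2]
    simp

-- ===== VERDICT (by name: the statement is the Claim_ definition above) =====
theorem build_docstring_py_spec : Claim_equal_build_docstring_py := by
  intro indent name params _
  exact build_eq indent name params
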